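-- pv_equiv track=rewrite | github.com/CS4248-Team4/LSTM | lstm.py | process_sectionNames
-- ===== SOURCE A (Python) =====
-- sec_name_mapping = {"discussion": 0, "introduction": 1, "unspecified": 2, "method": 3,
--                     "results": 4, "experiment": 5, "background": 6, "implementation": 7,
--                     "related work": 8, "analysis": 9, "conclusion": 10, "evaluation": 11,
--                     "appendix": 12, "limitation": 13}
--
-- def process_sectionNames(sectionNames):
--     returned = []
--     for sectionName in sectionNames:
--         sectionName = str(sectionName)
--         newSectionName = sectionName.lower()
--         if newSectionName != None:
--             if "introduction" in newSectionName or "preliminaries" in newSectionName: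
--                 newSectionName = "introduction"
--             elif "result" in newSectionName or "finding" in newSectionName:
--                 newSectionName = "results"
--             elif "method" in newSectionName or "approach" in newSectionName:
--                 newSectionName = "method"
--             elif "discussion" in newSectionName:
--                 newSectionName = "discussion"
--             elif "background" in newSectionName:
--                 newSectionName = "background"
--             elif "experiment" in newSectionName or "setup" in newSectionName or "set-up" in newSectionName or "set up" in newSectionName:
--                 newSectionName = "experiment"
--             elif "related work" in newSectionName or "relatedwork" in newSectionName or "prior work" in newSectionName or "literature review" in newSectionName:
--                 newSectionName = "related work"
--             elif "evaluation" in newSectionName: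
--                 newSectionName = "evaluation"
--             elif "implementation" in newSectionName:
--                 newSectionName = "implementation"
--             elif "conclusion" in newSectionName:
--                 newSectionName = "conclusion"
--             elif "limitation" in newSectionName:
--                 newSectionName = "limitation"
--             elif "appendix" in newSectionName:
--                 newSectionName = "appendix"
--             elif "future work" in newSectionName or "extension" in newSectionName:
--                 newSectionName = "appendix"
--             elif "analysis" in newSectionName:
--                 newSectionName = "analysis"
--             else:
--                 newSectionName = "unspecified"
--         returned.append(sec_name_mapping[newSectionName])
--     return returned
-- ===== SOURCE B (Python) =====
-- PATTERNS = ["introduction", "preliminaries", "result", "finding", "method", "approach",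
--             "discussion", "background", "experiment", "setup", "set-up", "set up",
--             "related work", "relatedwork", "prior work", "literature review",
--             "evaluation", "implementation", "conclusion", "limitation", "appendix",
--             "future work", "extension", "analysis"]
-- CODES = [1, 1, 4, 4, 3, 3, 0, 6, 5, 5, 5, 5, 8, 8, 8, 8, 11, 7, 10, 13, 12, 12, 12, 9]
--
-- def process_sectionNames(sectionNames):
--     result = []
--     for name in sectionNames:
--         s = str(name).lower()
--         matched = [i for i, p in enumerate(PATTERNS) if p in s]
--         result.append(CODES[min(matched)] if matched else 2)
--     return result
-- ===== Notes on version B (the rewrite author's own statement) =====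
-- stated objective: alternative
-- what changed: Instead of a short-circuiting 15-branch if/elif cascade mapping to category names then a dict lookup, B collects ALL matching pattern indices from one flat pattern array, takes the minimum index, and reads the code from a parallel code table (priority = array position).
import Mathlib
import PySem

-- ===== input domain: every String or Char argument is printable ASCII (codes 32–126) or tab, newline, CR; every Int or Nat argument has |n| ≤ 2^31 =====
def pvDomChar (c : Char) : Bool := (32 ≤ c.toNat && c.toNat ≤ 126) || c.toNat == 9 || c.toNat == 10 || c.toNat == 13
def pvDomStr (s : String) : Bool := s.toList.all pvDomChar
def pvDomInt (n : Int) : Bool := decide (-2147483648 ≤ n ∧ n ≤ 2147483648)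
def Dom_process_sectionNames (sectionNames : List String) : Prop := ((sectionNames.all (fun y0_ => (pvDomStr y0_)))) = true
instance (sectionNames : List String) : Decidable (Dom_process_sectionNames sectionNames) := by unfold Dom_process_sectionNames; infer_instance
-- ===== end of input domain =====

-- B replaces A's short-circuiting if/elif cascade (category name, then dict lookup) by a
-- different scheme: collect ALL matching pattern indices from a flat pattern array, take
-- the minimum index, and read the code from a parallel code table (objective: alternative).

-- ===== PORT A =====
-- the module-level dict sec_name_mapping
def secNameMapping : PySem.Dict String Int :=
  PySem.Dict.ofList [("discussion", 0), ("introduction", 1), ("unspecified", 2), ("method", 3),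
    ("results", 4), ("experiment", 5), ("background", 6), ("implementation", 7),
    ("related work", 8), ("analysis", 9), ("conclusion", 10), ("evaluation", 11),
    ("appendix", 12), ("limitation", 13)]

-- the body of A's loop for one sectionName; the final dict access always finds its key
-- (every branch assigns a key of the dict), so getD's default 0 is never used.
def pvAstep (sectionName : String) : Int :=
  let n := PySem.Str.lower sectionName
  let newName :=
    if PySem.Str.isIn "introduction" n || PySem.Str.isIn "preliminaries" n then "introduction"
    else if PySem.Str.isIn "result" n || PySem.Str.isIn "finding" n then "results"
    else if PySem.Str.isIn "method" n || PySem.Str.isIn "approach" n then "method"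
    else if PySem.Str.isIn "discussion" n then "discussion"
    else if PySem.Str.isIn "background" n then "background"
    else if PySem.Str.isIn "experiment" n || PySem.Str.isIn "setup" n ||
            PySem.Str.isIn "set-up" n || PySem.Str.isIn "set up" n then "experiment"
    else if PySem.Str.isIn "related work" n || PySem.Str.isIn "relatedwork" n ||
            PySem.Str.isIn "prior work" n || PySem.Str.isIn "literature review" n then "related work"
    else if PySem.Str.isIn "evaluation" n then "evaluation"
    else if PySem.Str.isIn "implementation" n then "implementation"
    else if PySem.Str.isIn "conclusion" n then "conclusion"
    else if PySem.Str.isIn "limitation" n then "limitation"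
    else if PySem.Str.isIn "appendix" n then "appendix"
    else if PySem.Str.isIn "future work" n || PySem.Str.isIn "extension" n then "appendix"
    else if PySem.Str.isIn "analysis" n then "analysis"
    else "unspecified"
  (secNameMapping.get? newName).getD 0

def process_sectionNames (sectionNames : List String) : List Int :=
  sectionNames.foldl (fun returned sectionName => returned ++ [pvAstep sectionName]) []

-- ===== PORT B =====
def pvPatterns : List String :=
  ["introduction", "preliminaries", "result", "finding", "method", "approach",
   "discussion", "background", "experiment", "setup", "set-up", "set up",
   "related work", "relatedwork", "prior work", "literature review",
   "evaluation", "implementation", "conclusion", "limitation", "appendix",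
   "future work", "extension", "analysis"]

def pvCodes : List Int := [1, 1, 4, 4, 3, 3, 0, 6, 5, 5, 5, 5, 8, 8, 8, 8, 11, 7, 10, 13, 12, 12, 12, 9]

-- matched = [i for i, p in enumerate(PATTERNS) if p in s]; CODES[min(matched)] if matched else 2
def pvBstep (name : String) : Int :=
  let s := PySem.Str.lower name
  let matched := (PySem.List.enumerate pvPatterns 0).filterMap
      (fun p => if PySem.Str.isIn p.2 s then some p.1 else none)
  match PySem.List.min? matched (fun x => x) with
  | some m => PySem.List.pyGetD pvCodes m 0
  | none => 2

def process_sectionNames_alt (sectionNames : List String) : List Int :=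
  sectionNames.foldl (fun result name => result ++ [pvBstep name]) []

-- ===== PRECONDITION & SPEC =====
def Spec_process_sectionNames (sectionNames : List String) (out : List Int) : Prop := out = process_sectionNames_alt sectionNames
instance (sectionNames : List String) (out : List Int) : Decidable (Spec_process_sectionNames sectionNames out) := by unfold Spec_process_sectionNames; infer_instance

-- ===== CLAIM =====
def Claim_equal_process_sectionNames : Prop := ∀ (sectionNames : List String), Dom_process_sectionNames sectionNames → Spec_process_sectionNames sectionNames (process_sectionNames sectionNames)

-- ===== LEMMAS AND PROOFS =====
-- folding min over a list that the start already bounds leaves the start unchanged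
theorem pv_foldl_min_eq (x : Int) : ∀ (t : List Int), (∀ y ∈ t, x ≤ y) → t.foldl min x = x := by
  intro t
  induction t with
  | nil => intro _; rfl
  | cons y t ih =>
    intro h
    have hx : min x y = x := min_eq_left (h y (List.mem_cons_self))
    simp only [List.foldl_cons, hx]
    exact ih (fun z hz => h z (List.mem_cons_of_mem _ hz))

-- the minimum of the matched indices of an index-sorted pair list is the first match
theorem pv_min_filterMap_eq_find {α : Type} (f : α → Bool) :
    ∀ (l : List (Int × α)), l.Pairwise (fun a b => a.1 < b.1) →
      PySem.List.min? (l.filterMap (fun p => if f p.2 then some p.1 else none)) (fun x => x)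
        = (l.find? (fun p => f p.2)).map Prod.fst := by
  intro l
  induction l with
  | nil => intro _; rfl
  | cons x t ih =>
    intro hp
    have hp1 : ∀ b ∈ t, x.1 < b.1 := (List.pairwise_cons.mp hp).1
    have hp2 := (List.pairwise_cons.mp hp).2
    cases hfx : f x.2 with
    | true =>
      simp only [List.filterMap_cons, if_true, List.find?_cons, hfx,
        PySem.List.min?_id_cons, Option.map_some]
      have hb : ∀ y ∈ t.filterMap (fun p => if f p.2 then some p.1 else none), x.1 ≤ y := by
        intro y hy
        rcases List.mem_filterMap.mp hy with ⟨a, ha, hfa⟩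
        cases h : f a.2 with
        | true => simp only [h, if_true, Option.some.injEq] at hfa; exact le_of_lt (hfa ▸ hp1 a ha)
        | false => simp [h] at hfa
      rw [pv_foldl_min_eq _ _ hb]
    | false =>
      simp only [List.filterMap_cons, List.find?_cons, hfx]
      exact ih hp2

set_option maxHeartbeats 4000000 in
theorem pvStep_eq (s : String) : pvAstep s = pvBstep s := by
  have hp : (PySem.List.enumerate pvPatterns 0).Pairwise (fun a b => a.1 < b.1) := by decide
  have hmin := pv_min_filterMap_eq_find (fun a => PySem.Str.isIn a (PySem.Str.lower s))
    (PySem.List.enumerate pvPatterns 0) hp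
  simp only [pvAstep, pvBstep]
  rw [hmin]
  cases h0 : PySem.Str.isIn "introduction" (PySem.Str.lower s) with
  | true => (simp only [pvPatterns, PySem.List.enumerate_cons, PySem.List.enumerate_nil, List.find?_cons, Bool.true_or, Option.map_some, reduceIte, h0]; rfl)
  | false =>
    cases h1 : PySem.Str.isIn "preliminaries" (PySem.Str.lower s) with
    | true => (simp only [pvPatterns, PySem.List.enumerate_cons, PySem.List.enumerate_nil, List.find?_cons, Bool.or_true, Option.map_some, reduceIte, h0, h1]; rfl)
    | false =>
      cases h2 : PySem.Str.isIn "result" (PySem.Str.lower s) with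
      | true => (simp only [pvPatterns, PySem.List.enumerate_cons, PySem.List.enumerate_nil, List.find?_cons, Bool.or_false, Bool.true_or, Option.map_some, reduceIte, h0, h1, h2]; rfl)
      | false =>
        cases h3 : PySem.Str.isIn "finding" (PySem.Str.lower s) with
        | true => (simp only [pvPatterns, PySem.List.enumerate_cons, PySem.List.enumerate_nil, List.find?_cons, Bool.or_false, Bool.or_true, Option.map_some, reduceIte, h0, h1, h2, h3]; rfl)
        | false =>
          cases h4 : PySem.Str.isIn "method" (PySem.Str.lower s) with
          | true => (simp only [pvPatterns, PySem.List.enumerate_cons, PySem.List.enumerate_nil, List.find?_cons, Bool.or_false, Bool.true_or, Option.map_some, reduceIte, h0, h1, h2, h3, h4]; rfl)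
          | false =>
            cases h5 : PySem.Str.isIn "approach" (PySem.Str.lower s) with
            | true => (simp only [pvPatterns, PySem.List.enumerate_cons, PySem.List.enumerate_nil, List.find?_cons, Bool.or_false, Bool.or_true, Option.map_some, reduceIte, h0, h1, h2, h3, h4, h5]; rfl)
            | false =>
              cases h6 : PySem.Str.isIn "discussion" (PySem.Str.lower s) with
              | true => (simp only [pvPatterns, PySem.List.enumerate_cons, PySem.List.enumerate_nil, List.find?_cons, Bool.or_false, Option.map_some, reduceIte, h0, h1, h2, h3, h4, h5, h6]; rfl)
              | false =>
                cases h7 : PySem.Str.isIn "background" (PySem.Str.lower s) with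
                | true => (simp only [pvPatterns, PySem.List.enumerate_cons, PySem.List.enumerate_nil, List.find?_cons, Bool.or_false, Option.map_some, reduceIte, h0, h1, h2, h3, h4, h5, h6, h7]; rfl)
                | false =>
                  cases h8 : PySem.Str.isIn "experiment" (PySem.Str.lower s) with
                  | true => (simp only [pvPatterns, PySem.List.enumerate_cons, PySem.List.enumerate_nil, List.find?_cons, Bool.or_false, Bool.true_or, Option.map_some, reduceIte, h0, h1, h2, h3, h4, h5, h6, h7, h8]; rfl)
                  | false =>
                    cases h9 : PySem.Str.isIn "setup" (PySem.Str.lower s) with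
                    | true => (simp only [pvPatterns, PySem.List.enumerate_cons, PySem.List.enumerate_nil, List.find?_cons, Bool.or_false, Bool.true_or, Bool.or_true, Option.map_some, reduceIte, h0, h1, h2, h3, h4, h5, h6, h7, h8, h9]; rfl)
                    | false =>
                      cases h10 : PySem.Str.isIn "set-up" (PySem.Str.lower s) with
                      | true => (simp only [pvPatterns, PySem.List.enumerate_cons, PySem.List.enumerate_nil, List.find?_cons, Bool.or_false, Bool.true_or, Bool.or_true, Option.map_some, reduceIte, h0, h1, h2, h3, h4, h5, h6, h7, h8, h9, h10]; rfl)
                      | false =>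
                        cases h11 : PySem.Str.isIn "set up" (PySem.Str.lower s) with
                        | true => (simp only [pvPatterns, PySem.List.enumerate_cons, PySem.List.enumerate_nil, List.find?_cons, Bool.or_false, Bool.or_true, Option.map_some, reduceIte, h0, h1, h2, h3, h4, h5, h6, h7, h8, h9, h10, h11]; rfl)
                        | false =>
                          cases h12 : PySem.Str.isIn "related work" (PySem.Str.lower s) with
                          | true => (simp only [pvPatterns, PySem.List.enumerate_cons, PySem.List.enumerate_nil, List.find?_cons, Bool.or_false, Bool.true_or, Option.map_some, reduceIte, h0, h1, h2, h3, h4, h5, h6, h7, h8, h9, h10, h11, h12]; rfl)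
                          | false =>
                            cases h13 : PySem.Str.isIn "relatedwork" (PySem.Str.lower s) with
                            | true => (simp only [pvPatterns, PySem.List.enumerate_cons, PySem.List.enumerate_nil, List.find?_cons, Bool.or_false, Bool.true_or, Bool.or_true, Option.map_some, reduceIte, h0, h1, h2, h3, h4, h5, h6, h7, h8, h9, h10, h11, h12, h13]; rfl)
                            | false =>
                              cases h14 : PySem.Str.isIn "prior work" (PySem.Str.lower s) with
                              | true => (simp only [pvPatterns, PySem.List.enumerate_cons, PySem.List.enumerate_nil, List.find?_cons, Bool.or_false, Bool.true_or, Bool.or_true, Option.map_some, reduceIte, h0, h1, h2, h3, h4, h5, h6, h7, h8, h9, h10, h11, h12, h13, h14]; rfl)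
                              | false =>
                                cases h15 : PySem.Str.isIn "literature review" (PySem.Str.lower s) with
                                | true => (simp only [pvPatterns, PySem.List.enumerate_cons, PySem.List.enumerate_nil, List.find?_cons, Bool.or_false, Bool.or_true, Option.map_some, reduceIte, h0, h1, h2, h3, h4, h5, h6, h7, h8, h9, h10, h11, h12, h13, h14, h15]; rfl)
                                | false =>
                                  cases h16 : PySem.Str.isIn "evaluation" (PySem.Str.lower s) with
                                  | true => (simp only [pvPatterns, PySem.List.enumerate_cons, PySem.List.enumerate_nil, List.find?_cons, Bool.or_false, Option.map_some, reduceIte, h0, h1, h2, h3, h4, h5, h6, h7, h8, h9, h10, h11, h12, h13, h14, h15, h16]; rfl)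
                                  | false =>
                                    cases h17 : PySem.Str.isIn "implementation" (PySem.Str.lower s) with
                                    | true => (simp only [pvPatterns, PySem.List.enumerate_cons, PySem.List.enumerate_nil, List.find?_cons, Bool.or_false, Option.map_some, reduceIte, h0, h1, h2, h3, h4, h5, h6, h7, h8, h9, h10, h11, h12, h13, h14, h15, h16, h17]; rfl)
                                    | false =>
                                      cases h18 : PySem.Str.isIn "conclusion" (PySem.Str.lower s) with
                                      | true => (simp only [pvPatterns, PySem.List.enumerate_cons, PySem.List.enumerate_nil, List.find?_cons, Bool.or_false, Option.map_some, reduceIte, h0, h1, h2, h3, h4, h5, h6, h7, h8, h9, h10, h11, h12, h13, h14, h15, h16, h17, h18]; rfl)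
                                      | false =>
                                        cases h19 : PySem.Str.isIn "limitation" (PySem.Str.lower s) with
                                        | true => (simp only [pvPatterns, PySem.List.enumerate_cons, PySem.List.enumerate_nil, List.find?_cons, Bool.or_false, Option.map_some, reduceIte, h0, h1, h2, h3, h4, h5, h6, h7, h8, h9, h10, h11, h12, h13, h14, h15, h16, h17, h18, h19]; rfl)
                                        | false =>
                                          cases h20 : PySem.Str.isIn "appendix" (PySem.Str.lower s) with
                                          | true => (simp only [pvPatterns, PySem.List.enumerate_cons, PySem.List.enumerate_nil, List.find?_cons, Bool.or_false, Option.map_some, reduceIte, h0, h1, h2, h3, h4, h5, h6, h7, h8, h9, h10, h11, h12, h13, h14, h15, h16, h17, h18, h19, h20]; rfl)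
                                          | false =>
                                            cases h21 : PySem.Str.isIn "future work" (PySem.Str.lower s) with
                                            | true => (simp only [pvPatterns, PySem.List.enumerate_cons, PySem.List.enumerate_nil, List.find?_cons, Bool.or_false, Bool.true_or, Option.map_some, reduceIte, h0, h1, h2, h3, h4, h5, h6, h7, h8, h9, h10, h11, h12, h13, h14, h15, h16, h17, h18, h19, h20, h21]; rfl)
                                            | false =>
                                              cases h22 : PySem.Str.isIn "extension" (PySem.Str.lower s) with
                                              | true => (simp only [pvPatterns, PySem.List.enumerate_cons, PySem.List.enumerate_nil, List.find?_cons, Bool.or_false, Bool.or_true, Option.map_some, reduceIte, h0, h1, h2, h3, h4, h5, h6, h7, h8, h9, h10, h11, h12, h13, h14, h15, h16, h17, h18, h19, h20, h21, h22]; rfl)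
                                              | false =>
                                                cases h23 : PySem.Str.isIn "analysis" (PySem.Str.lower s) with
                                                | true => (simp only [pvPatterns, PySem.List.enumerate_cons, PySem.List.enumerate_nil, List.find?_cons, Bool.or_false, Option.map_some, reduceIte, h0, h1, h2, h3, h4, h5, h6, h7, h8, h9, h10, h11, h12, h13, h14, h15, h16, h17, h18, h19, h20, h21, h22, h23]; rfl)
                                                | false =>
                                                  (simp only [pvPatterns, PySem.List.enumerate_cons, PySem.List.enumerate_nil, List.find?_cons, List.find?_nil, Bool.or_false, Option.map_none, h0, h1, h2, h3, h4, h5, h6, h7, h8, h9, h10, h11, h12, h13, h14, h15, h16, h17, h18, h19, h20, h21, h22, h23]; rfl)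

-- ===== VERDICT =====
theorem process_sectionNames_spec : Claim_equal_process_sectionNames := by
  intro xs _
  unfold Spec_process_sectionNames process_sectionNames process_sectionNames_alt
  rw [PySem.List.foldl_append_singleton_eq_map, PySem.List.foldl_append_singleton_eq_map]
  simp [List.map_congr_left fun s _ => pvStep_eq s]
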